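-- pv_equiv track=rewrite | github.com/Samach21/datastruct_exercise | ch1-5.py | listSquare
-- ===== SOURCE A (Python) =====
-- def listSquare(n, sym1, sym2):
--     ls = []
--     for i in range(1, n + 3):
--         if i == 1 or i == n + 2:
--             ls.append((n + 2) * sym1)
--         else :
--             ls.append(sym1 + (n * sym2) + sym1)
--     return ls
-- ===== SOURCE B (Python) =====
-- def listSquare(n, sym1, sym2):
--     size = n + 2
--     return [''.join(sym1 if r == 0 or r == size - 1 or c == 0 or c == size - 1 else sym2
--                     for c in range(size))
--             for r in range(size)]
-- ===== Notes on version B (the rewrite author's own statement) =====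
-- stated objective: alternative
-- what changed: B draws the square as a 2D cell grid — for each (row, col) pair it picks sym1 on border cells and sym2 inside, joining each row of cells — instead of assembling each whole row from string repetition with a per-row branch.
import Mathlib
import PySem

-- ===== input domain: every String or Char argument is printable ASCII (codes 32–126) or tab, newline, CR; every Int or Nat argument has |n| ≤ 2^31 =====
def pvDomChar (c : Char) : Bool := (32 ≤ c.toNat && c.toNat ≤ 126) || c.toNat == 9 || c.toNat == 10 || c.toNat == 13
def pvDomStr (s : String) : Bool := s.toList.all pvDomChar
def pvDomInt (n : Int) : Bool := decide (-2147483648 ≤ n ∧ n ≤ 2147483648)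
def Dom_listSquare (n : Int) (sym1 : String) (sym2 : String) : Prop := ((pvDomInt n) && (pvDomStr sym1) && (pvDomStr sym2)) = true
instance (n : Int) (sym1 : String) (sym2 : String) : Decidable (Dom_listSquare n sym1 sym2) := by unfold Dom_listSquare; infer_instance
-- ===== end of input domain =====

-- B builds the square cell by cell: a 2D comprehension chooses sym1 on border cells and sym2
-- inside and joins each row, instead of assembling each row from string repetition (alternative).

-- ===== PORT A =====
-- Python string repetition k * s (empty for k <= 0).
def pvStrMul (k : Int) (s : String) : String := String.ofList (PySem.List.pyRepeat s.toList k)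

def listSquare (n : Int) (sym1 : String) (sym2 : String) : List String :=
  (PySem.List.pyRange 1 (n + 3) 1).foldl
    (fun ls i =>
      if i = 1 ∨ i = n + 2 then ls ++ [pvStrMul (n + 2) sym1]
      else ls ++ [sym1 ++ pvStrMul n sym2 ++ sym1])
    []

-- ===== PORT B =====
def listSquare_alt (n : Int) (sym1 : String) (sym2 : String) : List String :=
  (PySem.List.pyRange 0 (n + 2) 1).map (fun r =>
    PySem.Str.join "" ((PySem.List.pyRange 0 (n + 2) 1).map (fun c =>
      if r = 0 ∨ r = (n + 2) - 1 ∨ c = 0 ∨ c = (n + 2) - 1 then sym1 else sym2)))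

-- ===== PRECONDITION & SPEC =====
def Spec_listSquare (n : Int) (sym1 : String) (sym2 : String) (out : List String) : Prop := out = listSquare_alt n sym1 sym2
instance (n : Int) (sym1 : String) (sym2 : String) (out : List String) : Decidable (Spec_listSquare n sym1 sym2 out) := by unfold Spec_listSquare; infer_instance

-- ===== CLAIM (what is proved, stated in full; the proofs are below) =====
def Claim_equal_listSquare : Prop := ∀ (n : Int) (sym1 : String) (sym2 : String), Dom_listSquare n sym1 sym2 → Spec_listSquare n sym1 sym2 (listSquare n sym1 sym2)

-- ===== LEMMAS AND PROOFS =====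

theorem pvFoldlAppendSingleton {α β : Type} (l : List α) (g : α → β) (init : List β) :
    l.foldl (fun acc i => acc ++ [g i]) init = init ++ l.map g := by
  induction l generalizing init with
  | nil => simp
  | cons x xs ih => simp [List.foldl, ih]

-- the A-side band: rows indexed 1..m+2, border at 1 and m+2
theorem pvRowsRange {α : Type} (m : Nat) (b c : α) :
    (List.range (m + 2)).map
      (fun (k : Nat) => if ((1 : Int) + k) = 1 ∨ ((1 : Int) + k) = (m : Int) + 2 then b else c)
    = b :: List.replicate m c ++ [b] := by
  rw [List.range_succ, List.map_append]
  have h1 : (List.range (m + 1)).map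
      (fun (k : Nat) => if ((1 : Int) + k) = 1 ∨ ((1 : Int) + k) = (m : Int) + 2 then b else c)
      = b :: List.replicate m c := by
    rw [List.range_succ_eq_map, List.map_cons, List.map_map]
    have h0 : ((1 : Int) + ((0 : Nat) : Int)) = 1 ∨ ((1 : Int) + ((0 : Nat) : Int)) = (m : Int) + 2 := by
      left; simp
    rw [if_pos h0]
    congr 1
    calc (List.range m).map
          ((fun (k : Nat) => if ((1 : Int) + k) = 1 ∨ ((1 : Int) + k) = (m : Int) + 2 then b else c) ∘ Nat.succ)
        = (List.range m).map (fun _ => c) := by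
          apply List.map_congr_left
          intro x hx
          have hxm : x < m := List.mem_range.mp hx
          have hne : ¬ (((1 : Int) + ((Nat.succ x : Nat) : Int)) = 1 ∨ ((1 : Int) + ((Nat.succ x : Nat) : Int)) = (m : Int) + 2) := by
            push_cast; omega
          simp only [Function.comp]
          rw [if_neg hne]
      _ = List.replicate m c := by simp
  rw [h1]
  have h2 : ((1 : Int) + ((m + 1 : Nat) : Int)) = 1 ∨ ((1 : Int) + ((m + 1 : Nat) : Int)) = (m : Int) + 2 := by
    right; push_cast; ring
  simp only [List.map_cons, List.map_nil]
  rw [if_pos h2]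

-- the B-side band: indexed 0..m+1, border at 0 and m+1
theorem pvRows0 {α : Type} (m : Nat) (b c : α) :
    (List.range (m + 2)).map
      (fun (k : Nat) => if ((k : Nat) : Int) = 0 ∨ ((k : Nat) : Int) = (m : Int) + 1 then b else c)
    = b :: List.replicate m c ++ [b] := by
  rw [List.range_succ, List.map_append]
  have h1 : (List.range (m + 1)).map
      (fun (k : Nat) => if ((k : Nat) : Int) = 0 ∨ ((k : Nat) : Int) = (m : Int) + 1 then b else c)
      = b :: List.replicate m c := by
    rw [List.range_succ_eq_map, List.map_cons, List.map_map]
    have h0 : (((0 : Nat) : Int)) = 0 ∨ (((0 : Nat) : Int)) = (m : Int) + 1 := by left; simp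
    rw [if_pos h0]
    congr 1
    calc (List.range m).map
          ((fun (k : Nat) => if ((k : Nat) : Int) = 0 ∨ ((k : Nat) : Int) = (m : Int) + 1 then b else c) ∘ Nat.succ)
        = (List.range m).map (fun _ => c) := by
          apply List.map_congr_left
          intro x hx
          have hxm : x < m := List.mem_range.mp hx
          have hne : ¬ ((((Nat.succ x : Nat) : Int)) = 0 ∨ (((Nat.succ x : Nat) : Int)) = (m : Int) + 1) := by
            push_cast; omega
          simp only [Function.comp]
          rw [if_neg hne]
      _ = List.replicate m c := by simp
  rw [h1]
  have h2 : (((m + 1 : Nat) : Int)) = 0 ∨ (((m + 1 : Nat) : Int)) = (m : Int) + 1 := by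
    right; push_cast; ring
  simp only [List.map_cons, List.map_nil]
  rw [if_pos h2]

theorem pvJoinEmpty (l : List String) :
    PySem.Str.join "" l = String.ofList ((l.map String.toList).flatten) := by
  have h : ∀ (xs : List (List Char)), PySem.Chars.join [] xs = xs.flatten := by
    intro xs
    induction xs with
    | nil => exact PySem.Chars.join_nil []
    | cons x ys ih =>
      cases ys with
      | nil => simp [PySem.Chars.join, List.intercalate]
      | cons y zs =>
        simp_all [PySem.Chars.join, List.intercalate, List.intersperse]
  simp [PySem.Str.join, h]

theorem pvJoinReplicate (k : Nat) (s : String) :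
    PySem.Str.join "" (List.replicate k s) = pvStrMul (k : Int) s := by
  rw [pvJoinEmpty, List.map_replicate]
  simp [pvStrMul, PySem.List.pyRepeat]

theorem pvJoinThree (m : Nat) (s1 s2 : String) :
    PySem.Str.join "" (s1 :: List.replicate m s2 ++ [s1]) = s1 ++ pvStrMul (m : Int) s2 ++ s1 := by
  rw [pvJoinEmpty]
  apply String.toList_injective
  simp [pvStrMul, PySem.List.pyRepeat, List.map_replicate]

-- a border row of B (r = 0 or r = size-1) equals A's border string
theorem pvRowBorder (m : Nat) (s1 s2 : String) (r : Int)
    (hr : r = 0 ∨ r = (m : Int) + 1) :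
    PySem.Str.join "" ((PySem.List.pyRange 0 ((m : Int) + 2) 1).map (fun c =>
      if r = 0 ∨ r = (m : Int) + 2 - 1 ∨ c = 0 ∨ c = (m : Int) + 2 - 1 then s1 else s2))
    = pvStrMul ((m : Int) + 2) s1 := by
  have hconst : (PySem.List.pyRange 0 ((m : Int) + 2) 1).map (fun c =>
      if r = 0 ∨ r = (m : Int) + 2 - 1 ∨ c = 0 ∨ c = (m : Int) + 2 - 1 then s1 else s2)
      = List.replicate (m + 2) s1 := by
    have hlen : (PySem.List.pyRange 0 ((m : Int) + 2) 1).length = m + 2 := by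
      rw [PySem.List.length_pyRange_one]; omega
    calc (PySem.List.pyRange 0 ((m : Int) + 2) 1).map (fun c =>
          if r = 0 ∨ r = (m : Int) + 2 - 1 ∨ c = 0 ∨ c = (m : Int) + 2 - 1 then s1 else s2)
        = (PySem.List.pyRange 0 ((m : Int) + 2) 1).map (fun _ => s1) := by
          apply List.map_congr_left
          intro c _
          have hc : r = 0 ∨ r = (m : Int) + 2 - 1 ∨ c = 0 ∨ c = (m : Int) + 2 - 1 := by
            rcases hr with h | h
            · exact Or.inl h
            · exact Or.inr (Or.inl (by omega))
          rw [if_pos hc]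
      _ = List.replicate (m + 2) s1 := by rw [List.map_const', hlen]
  rw [hconst, pvJoinReplicate]
  push_cast
  rfl

-- a middle row of B equals A's middle string
theorem pvRowMiddle (m : Nat) (s1 s2 : String) (r : Int)
    (hr0 : r ≠ 0) (hr1 : r ≠ (m : Int) + 1) :
    PySem.Str.join "" ((PySem.List.pyRange 0 ((m : Int) + 2) 1).map (fun c =>
      if r = 0 ∨ r = (m : Int) + 2 - 1 ∨ c = 0 ∨ c = (m : Int) + 2 - 1 then s1 else s2))
    = s1 ++ pvStrMul (m : Int) s2 ++ s1 := by
  have hfun : (PySem.List.pyRange 0 ((m : Int) + 2) 1).map (fun c =>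
      if r = 0 ∨ r = (m : Int) + 2 - 1 ∨ c = 0 ∨ c = (m : Int) + 2 - 1 then s1 else s2)
      = s1 :: List.replicate m s2 ++ [s1] := by
    rw [PySem.List.pyRange_one]
    have hcnt : ((m : Int) + 2 - 0).toNat = m + 2 := by omega
    rw [hcnt, List.map_map]
    calc (List.range (m + 2)).map
          ((fun c => if r = 0 ∨ r = (m : Int) + 2 - 1 ∨ c = 0 ∨ c = (m : Int) + 2 - 1 then s1 else s2)
            ∘ (fun (k : Nat) => (0 : Int) + k))
        = (List.range (m + 2)).map
            (fun (k : Nat) => if ((k : Nat) : Int) = 0 ∨ ((k : Nat) : Int) = (m : Int) + 1 then s1 else s2) := by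
          apply List.map_congr_left
          intro k _
          simp only [Function.comp]
          simp only [zero_add]
          by_cases hk : ((k : Nat) : Int) = 0 ∨ ((k : Nat) : Int) = (m : Int) + 1
          · have hc : r = 0 ∨ r = (m : Int) + 2 - 1 ∨ (k : Int) = 0 ∨ (k : Int) = (m : Int) + 2 - 1 := by
              rcases hk with h | h
              · exact Or.inr (Or.inr (Or.inl h))
              · exact Or.inr (Or.inr (Or.inr (by omega)))
            rw [if_pos hc, if_pos hk]
          · have hc : ¬ (r = 0 ∨ r = (m : Int) + 2 - 1 ∨ (k : Int) = 0 ∨ (k : Int) = (m : Int) + 2 - 1) := by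
              push Not at hk ⊢
              refine ⟨hr0, by omega, hk.1, by omega⟩
            rw [if_neg hc, if_neg hk]
      _ = s1 :: List.replicate m s2 ++ [s1] := pvRows0 m s1 s2
  rw [hfun, pvJoinThree]

-- ===== VERDICT (by name: the statement is the Claim_ definition above) =====
theorem listSquare_spec : Claim_equal_listSquare := by
  intro n sym1 sym2 _
  unfold Spec_listSquare listSquare listSquare_alt
  rcases lt_trichotomy n (-1) with hlt | heq | hgt
  · rw [PySem.List.pyRange_one_eq_nil (by omega : n + 3 ≤ 1),
        PySem.List.pyRange_one_eq_nil (by omega : n + 2 ≤ 0)]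
    rfl
  · subst heq
    rw [show ((-1 : Int) + 3) = 1 + 1 from rfl, PySem.List.pyRange_one_singleton,
        show ((-1 : Int) + 2) = 0 + 1 from rfl, PySem.List.pyRange_one_singleton]
    simp only [List.foldl, List.map_cons, List.map_nil]
    norm_num
    apply String.toList_injective
    simp [pvStrMul, PySem.List.pyRepeat, pvJoinEmpty]
  · have hn : 0 ≤ n := by omega
    obtain ⟨m, rfl⟩ := Int.eq_ofNat_of_zero_le hn
    -- A side
    have hfunA : (fun (ls : List String) (i : Int) =>
        if i = 1 ∨ i = (m : Int) + 2 then ls ++ [pvStrMul ((m : Int) + 2) sym1]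
        else ls ++ [sym1 ++ pvStrMul (m : Int) sym2 ++ sym1]) =
        fun (ls : List String) (i : Int) => ls ++
          [if i = 1 ∨ i = (m : Int) + 2 then pvStrMul ((m : Int) + 2) sym1
           else sym1 ++ pvStrMul (m : Int) sym2 ++ sym1] := by
      funext ls i; split_ifs <;> rfl
    rw [hfunA, PySem.List.pyRange_one 1 ((m : Int) + 3), pvFoldlAppendSingleton, List.map_map,
        List.nil_append]
    have hcntA : ((m : Int) + 3 - 1).toNat = m + 2 := by omega
    rw [hcntA]
    have hA := pvRowsRange m (pvStrMul ((m : Int) + 2) sym1)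
      (sym1 ++ pvStrMul (m : Int) sym2 ++ sym1)
    rw [show ((fun i => if i = 1 ∨ i = (m : Int) + 2 then pvStrMul ((m : Int) + 2) sym1
          else sym1 ++ pvStrMul (m : Int) sym2 ++ sym1) ∘ fun (k : Nat) => (1 : Int) + k)
        = fun (k : Nat) => if ((1 : Int) + k) = 1 ∨ ((1 : Int) + k) = (m : Int) + 2
            then pvStrMul ((m : Int) + 2) sym1
            else sym1 ++ pvStrMul (m : Int) sym2 ++ sym1 from rfl, hA]
    -- B side
    rw [PySem.List.pyRange_one 0 ((m : Int) + 2)]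
    have hcntB : ((m : Int) + 2 - 0).toNat = m + 2 := by omega
    rw [hcntB, List.map_map]
    have hpy : (List.range (m + 2)).map (fun (k : Nat) => (0 : Int) + k)
        = PySem.List.pyRange 0 ((m : Int) + 2) 1 := by
      rw [PySem.List.pyRange_one, hcntB]
    have hB : (List.range (m + 2)).map
        ((fun r => PySem.Str.join "" (((List.range (m + 2)).map (fun (k : Nat) => (0 : Int) + k)).map (fun c =>
            if r = 0 ∨ r = (m : Int) + 2 - 1 ∨ c = 0 ∨ c = (m : Int) + 2 - 1 then sym1 else sym2)))
          ∘ (fun (k : Nat) => (0 : Int) + k))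
        = (List.range (m + 2)).map
          (fun (k : Nat) => if ((k : Nat) : Int) = 0 ∨ ((k : Nat) : Int) = (m : Int) + 1
            then pvStrMul ((m : Int) + 2) sym1
            else sym1 ++ pvStrMul (m : Int) sym2 ++ sym1) := by
      rw [hpy]
      apply List.map_congr_left
      intro k _
      simp only [Function.comp]
      simp only [zero_add]
      by_cases hk : ((k : Nat) : Int) = 0 ∨ ((k : Nat) : Int) = (m : Int) + 1
      · rw [if_pos hk, pvRowBorder m sym1 sym2 (k : Int) hk]
      · push Not at hk
        rw [if_neg (by push Not; exact hk), pvRowMiddle m sym1 sym2 (k : Int) hk.1 hk.2]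
    rw [hB, pvRows0 m (pvStrMul ((m : Int) + 2) sym1) (sym1 ++ pvStrMul (m : Int) sym2 ++ sym1)]
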